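-- pv_equiv track=rewrite | github.com/ayush2438/PYTHONDS | 04_loops/06_practice.py | scan_parcels
-- ===== SOURCE A (Python) =====
-- def scan_parcels(parcel_codes: list[str]) -> list[str]:
--     # Write your code below this line
--     logs = []
--     for code in parcel_codes:
--         if code == "DAMAGED":
--             logs.append("Skipped damaged parcel")
--             continue
--         if code == "STOP":
--             logs.append("Critical error: Stopping scan")
--             break
--         logs.append(f"Scanned parcel: {code}")
--     else:
--         logs.append("All parcels scanned successfully")
--     return logs
-- ===== SOURCE B (Python) =====
-- def scan_parcels(parcel_codes: list[str]) -> list[str]: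
--     try:
--         stop = parcel_codes.index("STOP")
--     except ValueError:
--         stop = len(parcel_codes)
--     logs = ["Skipped damaged parcel" if code == "DAMAGED" else f"Scanned parcel: {code}"
--             for code in parcel_codes[:stop]]
--     if stop < len(parcel_codes):
--         logs.append("Critical error: Stopping scan")
--     else:
--         logs.append("All parcels scanned successfully")
--     return logs
-- ===== Notes on version B (the rewrite author's own statement) =====
-- stated objective: alternative
-- what changed: Replaces the single for-else loop with break by an index-first decomposition: find the STOP cutoff with list.index, map the prefix to messages with a comprehension, then append the final message from a length comparison.
import Mathlib
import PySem

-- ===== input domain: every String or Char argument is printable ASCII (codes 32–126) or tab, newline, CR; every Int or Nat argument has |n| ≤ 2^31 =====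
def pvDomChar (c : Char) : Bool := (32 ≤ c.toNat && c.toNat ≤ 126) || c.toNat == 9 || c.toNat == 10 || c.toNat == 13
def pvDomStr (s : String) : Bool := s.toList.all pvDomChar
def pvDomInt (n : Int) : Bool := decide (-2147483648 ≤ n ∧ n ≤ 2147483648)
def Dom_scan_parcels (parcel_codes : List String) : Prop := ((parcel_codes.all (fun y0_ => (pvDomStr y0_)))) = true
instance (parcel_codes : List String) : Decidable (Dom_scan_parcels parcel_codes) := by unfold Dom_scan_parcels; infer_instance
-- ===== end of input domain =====

-- B replaces the for-else loop with break by an index-first decomposition (find STOP cutoff, map the prefix, append the final message); alternative, not faster.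

-- ===== PORT A =====
-- A's loop with `break`/`continue` and the for-else clause, as structural recursion:
-- each loop iteration is one recursive step; `break` stops the recursion, the else-branch
-- fires when the list is exhausted.
def scan_parcels (parcel_codes : List String) : List String :=
  match parcel_codes with
  | [] => ["All parcels scanned successfully"]
  | code :: rest =>
    if code = "DAMAGED" then "Skipped damaged parcel" :: scan_parcels rest
    else if code = "STOP" then ["Critical error: Stopping scan"]
    else ("Scanned parcel: " ++ code) :: scan_parcels rest

-- ===== PORT B =====
def scan_parcels_alt (parcel_codes : List String) : List String :=
  let stop : Nat := (PySem.List.index? parcel_codes "STOP").getD parcel_codes.length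
  let logs := (PySem.List.slice parcel_codes none (some (stop : Int))).map
      (fun code => if code = "DAMAGED" then "Skipped damaged parcel" else "Scanned parcel: " ++ code)
  logs ++ [if stop < parcel_codes.length then "Critical error: Stopping scan"
           else "All parcels scanned successfully"]

-- ===== PRECONDITION & SPEC =====
def Spec_scan_parcels (parcel_codes : List String) (out : List String) : Prop := out = scan_parcels_alt parcel_codes
instance (parcel_codes : List String) (out : List String) : Decidable (Spec_scan_parcels parcel_codes out) := by unfold Spec_scan_parcels; infer_instance

-- ===== CLAIM (what is proved, stated in full; the proofs are below) =====
def Claim_equal_scan_parcels : Prop := ∀ (parcel_codes : List String), Dom_scan_parcels parcel_codes → Spec_scan_parcels parcel_codes (scan_parcels parcel_codes)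

-- ===== LEMMAS AND PROOFS =====

theorem scan_parcels_alt_eq (parcel_codes : List String) :
    scan_parcels parcel_codes = scan_parcels_alt parcel_codes := by
  induction parcel_codes with
  | nil => simp [scan_parcels, scan_parcels_alt, PySem.List.slice]
  | cons c rest ih =>
    by_cases hs : c = "STOP"
    · subst hs
      rw [scan_parcels_alt]
      rw [PySem.List.index?_cons_self]
      simp [scan_parcels, PySem.List.slice]
    · have hidx : PySem.List.index? (c :: rest) "STOP" = (PySem.List.index? rest "STOP").map (· + 1) :=
        PySem.List.index?_cons_of_ne rest hs
      rw [scan_parcels_alt, hidx]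
      rw [PySem.List.index?_eq_idxOf?] at hidx ⊢
      cases hr : List.idxOf? "STOP" rest with
      | none =>
        simp only [Option.map_none, Option.getD_none]
        rw [scan_parcels, ih, scan_parcels_alt]
        simp [hr, PySem.List.slice, PySem.List.clampIdx, hs]
        have h0 : ¬((rest.length : Int) < 0) := by omega
        have h1 : ¬((rest.length : Int) + 1 < 0) := by omega
        simp [h0, h1, List.take_of_length_le]
        split_ifs <;> rfl
      | some k =>
        have hk : k ≤ rest.length := by
          have hi : PySem.List.index? rest "STOP" = some k := by
            rw [PySem.List.index?_eq_idxOf?]; exact hr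
          have := PySem.List.getElem_of_index?_eq_some hi
          obtain ⟨hk', _, _⟩ := this
          omega
        simp only [Option.map_some, Option.getD_some]
        rw [scan_parcels, ih, scan_parcels_alt]
        rw [PySem.List.slice_to_natCast, PySem.List.slice_to_natCast]
        simp [hr, hs, List.take_succ_cons]
        split_ifs <;> rfl

-- ===== VERDICT (by name: the statement is the Claim_ definition above) =====
theorem scan_parcels_spec : Claim_equal_scan_parcels := by
  intro pcs _
  exact scan_parcels_alt_eq pcs
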